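-- pv_equiv track=rewrite | github.com/pypi-data/pypi-mirror-302 | packages/simple-asr/simple_asr-0.0.1-py3-none-any.whl/simple_asr/__init__.py | clean_text_unicode
-- ===== SOURCE A (Python) =====
-- from typing import Any, Callable, Dict, List, Optional, Tuple, Sequence, Set, Union
-- import unicodedata
--
-- def clean_text_unicode(text: str,
--                        charactersToKeep: Optional[Sequence[str]] = None,
--                        codeSwitchSymbol: str = '[C]',
--                        useCodeSwitchData: bool = True,
--                        doubtfulSymbol: str = '[D]',
--                        useDoubtfulData: bool = True) -> str:
--     """Strip non-word characters based on Unicode character classes.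
--
--     :param text: The string to be cleaned
--     :type text: str
--     :param charactersToKeep: A list of punctuation characters to retain
--     :type charactersToKeep: list, optional
--     :param codeSwitchSymbol: A symbol which indicates that the contents of
--         ``text`` include codeswitching. The symbol will be removed from ``text``,
--         defaults to `'[C]'`
--     :type codeSwitchSymbol: str, optional
--     :param useCodeSwitchData: If `False` and ``codeSwitchSymbole`` is present
--         in ``text``, return an empty string, defaults to `True`
--     :type useCodeSwitchData: bool, optional
--     :param doubtfulSymbol: A symbol that incdicates that the contents of
--         ``text`` are uncertain. The symbol will be removed from ``text``,
--         defaults to `'[D]'`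
--     :type doubtfulSymbol: str, optional
--     :param useDoubtfulData: where doubtful data should be included in training
--     :type useDoubtfulData: bool, optional
--     :return: The cleaned string, or an empty string if codeswitched or
--         uncertain annotations have been excluded
--     :rtype: str
--
--     The marker symbols will be removed from `text`. If either marker is present
--     and the corresponding flag is False, the function will return an empty
--     string.
--     """
--     s = text
--     if codeSwitchSymbol in s:
--         if useCodeSwitchData:
--             s = s.replace(codeSwitchSymbol, '')
--         else:
--             return ''
--     if doubtfulSymbol in s:
--         if useDoubtfulData:
--             s = s.replace(doubtfulSymbol, '')
--         else:
--             return ''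
--     ls = []
--     cset = set(charactersToKeep or '')
--     tset = set(['Ll', 'Lm', 'Lo', 'Lt', 'Lu', 'Mn', 'Nd', 'Nl', 'No'])
--     for c in s:
--         typ = unicodedata.category(c)
--         if c in cset or typ in tset:
--             ls.append(c)
--         else:
--             ls.append(' ')
--     return ' '.join(''.join(ls).split())
-- ===== SOURCE B (Python) =====
-- from typing import Optional, Sequence
-- import unicodedata
--
-- def clean_text_unicode(text: str,
--                        charactersToKeep: Optional[Sequence[str]] = None,
--                        codeSwitchSymbol: str = '[C]',
--                        useCodeSwitchData: bool = True,
--                        doubtfulSymbol: str = '[D]',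
--                        useDoubtfulData: bool = True) -> str:
--     s = text
--     for sym, use in ((codeSwitchSymbol, useCodeSwitchData),
--                      (doubtfulSymbol, useDoubtfulData)):
--         if sym in s:
--             if not use:
--                 return ''
--             s = s.replace(sym, '')
--     cks = charactersToKeep or ''
--     out = []
--     in_word = False
--     for c in s:
--         typ = unicodedata.category(c)
--         if (c in cks or typ.startswith('L') or typ in ('Mn', 'Nd', 'Nl', 'No')) \
--                 and not c.isspace():
--             if not in_word and out:
--                 out.append(' ')
--             out.append(c)
--             in_word = True
--         else:
--             in_word = False
--     return ''.join(out)
-- ===== Notes on version B (the rewrite author's own statement) =====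
-- stated objective: alternative
-- what changed: B folds the two marker symbols in one loop and replaces A's map-to-spaces-then-split-then-join phase by a single pass that writes the output directly, inserting a separating space when a new word starts, with no intermediate word list or re-split.
import Mathlib
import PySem

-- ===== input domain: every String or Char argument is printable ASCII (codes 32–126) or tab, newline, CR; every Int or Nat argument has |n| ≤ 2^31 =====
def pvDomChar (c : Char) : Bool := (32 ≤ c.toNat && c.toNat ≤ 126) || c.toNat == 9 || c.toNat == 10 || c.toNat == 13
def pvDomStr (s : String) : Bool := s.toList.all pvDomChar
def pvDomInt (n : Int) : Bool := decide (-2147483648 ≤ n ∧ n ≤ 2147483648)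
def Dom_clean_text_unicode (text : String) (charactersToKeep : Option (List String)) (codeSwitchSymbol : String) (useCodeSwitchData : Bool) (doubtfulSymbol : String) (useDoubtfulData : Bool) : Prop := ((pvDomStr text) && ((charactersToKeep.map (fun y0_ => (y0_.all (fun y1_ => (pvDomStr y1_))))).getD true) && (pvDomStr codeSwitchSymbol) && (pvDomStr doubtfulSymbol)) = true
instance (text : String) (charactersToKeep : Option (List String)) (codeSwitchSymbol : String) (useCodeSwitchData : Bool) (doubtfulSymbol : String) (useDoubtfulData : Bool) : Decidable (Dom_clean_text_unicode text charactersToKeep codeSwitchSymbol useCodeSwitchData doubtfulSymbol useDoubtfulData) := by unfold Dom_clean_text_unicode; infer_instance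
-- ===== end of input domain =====

-- B folds the two marker symbols in one loop and replaces A's map-to-spaces /
-- split / join phase by a single pass that writes the output directly (a space
-- is inserted whenever a new word starts); same cost, different decomposition.

-- unicodedata.category, exact on the domain's characters (printable ASCII 32–126 and tab/newline/CR)
def pvCategory (c : Char) : String :=
  if 'a' ≤ c ∧ c ≤ 'z' then "Ll"
  else if 'A' ≤ c ∧ c ≤ 'Z' then "Lu"
  else if '0' ≤ c ∧ c ≤ '9' then "Nd"
  else if c = ' ' then "Zs"
  else if c.toNat = 9 ∨ c.toNat = 10 ∨ c.toNat = 13 then "Cc"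
  else if c = '-' then "Pd"
  else if c = '_' then "Pc"
  else if c = '(' ∨ c = '[' ∨ c = '{' then "Ps"
  else if c = ')' ∨ c = ']' ∨ c = '}' then "Pe"
  else if c = '$' then "Sc"
  else if c = '^' ∨ c = '`' then "Sk"
  else if c = '+' ∨ c = '<' ∨ c = '=' ∨ c = '>' ∨ c = '|' ∨ c = '~' then "Sm"
  else "Po"

-- ===== PORT A =====
-- A's two separate marker 'if' blocks; none = the early "return ''"
def pvStripMarker (s sym : String) (use : Bool) : Option String :=
  if PySem.Str.isIn sym s then
    (if use then some (PySem.Str.replace s sym "") else none)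
  else some s

-- ''.join(ls).split() on a char list ls is PySem.Chars.split₀ ls; the final ' '.join is
-- PySem.Chars.join [' '] (both exact); membership 'c in cset' is on the 1-char string.
def cleanCoreA (s : String) (charactersToKeep : Option (List String)) : String :=
  let cset : PySem.Set String := PySem.Set.ofList (charactersToKeep.getD [])
  let tset : PySem.Set String := PySem.Set.ofList ["Ll", "Lm", "Lo", "Lt", "Lu", "Mn", "Nd", "Nl", "No"]
  let ls : List Char := s.toList.foldl (fun ls c =>
    if PySem.Set.contains cset (String.mk [c]) || PySem.Set.contains tset (pvCategory c)
    then ls ++ [c] else ls ++ [' ']) []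
  String.mk (PySem.Chars.join [' '] (PySem.Chars.split₀ ls))

def clean_text_unicode (text : String) (charactersToKeep : Option (List String)) (codeSwitchSymbol : String) (useCodeSwitchData : Bool) (doubtfulSymbol : String) (useDoubtfulData : Bool) : String :=
  match pvStripMarker text codeSwitchSymbol useCodeSwitchData with
  | none => ""
  | some s1 =>
    match pvStripMarker s1 doubtfulSymbol useDoubtfulData with
    | none => ""
    | some s2 => cleanCoreA s2 charactersToKeep

-- ===== PORT B =====
-- B's 'for sym, use in (…)' marker loop
def stripMarkersB : String → List (String × Bool) → Option String
  | s, [] => some s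
  | s, (sym, use) :: rest =>
    if PySem.Str.isIn sym s then
      if use then stripMarkersB (PySem.Str.replace s sym "") rest else none
    else stripMarkersB s rest

-- B's single output pass: out is the chars emitted so far, inWord the in_word flag
def emitWords (keep : Char → Bool) : List Char → List Char → Bool → List Char
  | [], out, _ => out
  | c :: rest, out, inWord =>
    if keep c then
      emitWords keep rest (out ++ (if !inWord && !out.isEmpty then [' ', c] else [c])) true
    else
      emitWords keep rest out false

-- B's keep test: c in (charactersToKeep or ''), or category starts with 'L',
-- or category in ('Mn','Nd','Nl','No'); and not c.isspace()
def cleanCoreB (s : String) (charactersToKeep : Option (List String)) : String :=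
  let cks : List String := charactersToKeep.getD []
  let keep : Char → Bool := fun c =>
    let typ := pvCategory c
    (cks.contains (String.mk [c]) || PySem.Str.startswith typ "L"
        || ["Mn", "Nd", "Nl", "No"].contains typ)
      && !(PySem.Chars.isspace c)
  String.mk (emitWords keep s.toList [] false)

def clean_text_unicode_alt (text : String) (charactersToKeep : Option (List String)) (codeSwitchSymbol : String) (useCodeSwitchData : Bool) (doubtfulSymbol : String) (useDoubtfulData : Bool) : String :=
  match stripMarkersB text [(codeSwitchSymbol, useCodeSwitchData), (doubtfulSymbol, useDoubtfulData)] with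
  | none => ""
  | some s => cleanCoreB s charactersToKeep

-- ===== PRECONDITION & SPEC =====
def Spec_clean_text_unicode (text : String) (charactersToKeep : Option (List String)) (codeSwitchSymbol : String) (useCodeSwitchData : Bool) (doubtfulSymbol : String) (useDoubtfulData : Bool) (out : String) : Prop := out = clean_text_unicode_alt text charactersToKeep codeSwitchSymbol useCodeSwitchData doubtfulSymbol useDoubtfulData
instance (text : String) (charactersToKeep : Option (List String)) (codeSwitchSymbol : String) (useCodeSwitchData : Bool) (doubtfulSymbol : String) (useDoubtfulData : Bool) (out : String) : Decidable (Spec_clean_text_unicode text charactersToKeep codeSwitchSymbol useCodeSwitchData doubtfulSymbol useDoubtfulData out) := by unfold Spec_clean_text_unicode; infer_instance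

-- ===== CLAIM (what is proved, stated in full; the proofs are below) =====
def Claim_equal_clean_text_unicode : Prop := ∀ (text : String) (charactersToKeep : Option (List String)) (codeSwitchSymbol : String) (useCodeSwitchData : Bool) (doubtfulSymbol : String) (useDoubtfulData : Bool), Dom_clean_text_unicode text charactersToKeep codeSwitchSymbol useCodeSwitchData doubtfulSymbol useDoubtfulData → Spec_clean_text_unicode text charactersToKeep codeSwitchSymbol useCodeSwitchData doubtfulSymbol useDoubtfulData (clean_text_unicode text charactersToKeep codeSwitchSymbol useCodeSwitchData doubtfulSymbol useDoubtfulData)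

-- ===== LEMMAS AND PROOFS =====

-- proof-only intermediate: word list built directly (links A's split to B's emit)
def goWords (keep : Char → Bool) : List Char → List Char → List (List Char) → List (List Char)
  | [], buf, words => if buf.isEmpty then words else words ++ [buf]
  | c :: rest, buf, words =>
    if keep c then goWords keep rest (buf ++ [c]) words
    else if buf.isEmpty then goWords keep rest [] words
    else goWords keep rest [] (words ++ [buf])


-- A's append-loop builds the pointwise mask
lemma mask_foldl_eq_map (p : Char → Bool) (s : List Char) (acc : List Char) :
    s.foldl (fun ls c => if p c then ls ++ [c] else ls ++ [' ']) acc
      = acc ++ s.map (fun c => if p c then c else ' ') := by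
  induction s generalizing acc with
  | nil => simp
  | cons c rest ih => by_cases h : p c <;> simp [h, ih]

-- splitting the mask equals building words directly
lemma split_go_eq_goWords (p : Char → Bool) (s : List Char) :
    ∀ (buf : List Char) (words : List (List Char)),
    PySem.Chars.split₀.go (s.map (fun c => if p c then c else ' ')) buf.reverse words.reverse
      = goWords (fun c => p c && !(PySem.Chars.isspace c)) s buf words := by
  induction s with
  | nil =>
    intro buf words
    simp only [List.map_nil, PySem.Chars.split₀.go, goWords]
    by_cases h : buf.isEmpty
    · simp [List.isEmpty_iff.mp h]
    · have h' : buf ≠ [] := fun he => h (by simp [he])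
      simp [h']
  | cons c rest ih =>
    intro buf words
    by_cases hp : p c
    · by_cases hs : PySem.Chars.isspace c
      · simp only [List.map_cons, PySem.Chars.split₀.go, hs, goWords, hp, Bool.true_and,
          Bool.not_true, if_true]
        by_cases hb : buf.isEmpty
        · simpa [hb, hs] using ih [] words
        · have hb' : buf ≠ [] := fun he => hb (by simp [he])
          have := ih [] (words ++ [buf])
          simp only [List.reverse_nil, List.reverse_append, List.reverse_cons,
            List.reverse_nil, List.nil_append] at this
          simpa [hb, hb', hs] using this
      · have := ih (buf ++ [c]) words
        simp only [List.reverse_append, List.reverse_cons, List.reverse_nil,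
          List.nil_append, List.cons_append] at this
        simpa [hp, hs, PySem.Chars.split₀.go, goWords] using this
    · have hsp : PySem.Chars.isspace ' ' = true := by decide
      simp only [List.map_cons, PySem.Chars.split₀.go, hsp, if_true, goWords,
        hp, Bool.false_and, Bool.false_eq_true, if_false]
      by_cases hb : buf.isEmpty
      · simpa [hb] using ih [] words
      · have hb' : buf ≠ [] := fun he => hb (by simp [he])
        have := ih [] (words ++ [buf])
        simp only [List.reverse_nil, List.reverse_append, List.reverse_cons,
          List.nil_append] at this
        simpa [hb, hb'] using this


lemma join_cons_cons (a b : List Char) (l : List (List Char)) :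
    PySem.Chars.join [' '] (a :: b :: l) = a ++ [' '] ++ PySem.Chars.join [' '] (b :: l) := by
  simp [PySem.Chars.join, List.intercalate]

lemma join_nil' : PySem.Chars.join [' '] ([] : List (List Char)) = [] := by
  simp [PySem.Chars.join, List.intercalate]

lemma join_singleton' (a : List Char) : PySem.Chars.join [' '] [a] = a := by
  simp [PySem.Chars.join, List.intercalate]

lemma join_append_singleton (ws : List (List Char)) (b : List Char) :
    PySem.Chars.join [' '] (ws ++ [b])
      = PySem.Chars.join [' '] ws ++ (if ws.isEmpty then [] else [' ']) ++ b := by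
  induction ws with
  | nil => simp [PySem.Chars.join, List.intercalate]
  | cons w ws ih =>
    cases ws with
    | nil => simp [PySem.Chars.join, List.intercalate]
    | cons w' ws' =>
      have h2 : (w :: w' :: ws') ++ [b] = w :: ((w' :: ws') ++ [b]) := by simp
      rw [h2, show (w' :: ws') ++ [b] = w' :: (ws' ++ [b]) by simp, join_cons_cons,
        show (w' :: (ws' ++ [b])) = (w' :: ws') ++ [b] by simp, ih, join_cons_cons]
      simp

lemma join_ne_nil (ws : List (List Char)) (hne : [] ∉ ws) (h : ¬ ws.isEmpty) :
    ¬ (PySem.Chars.join [' '] ws).isEmpty := by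
  cases ws with
  | nil => simp at h
  | cons w ws' =>
    have hw : w ≠ [] := by intro he; exact hne (by simp [he])
    cases ws' with
    | nil => simpa [join_singleton'] using hw
    | cons w' ws'' =>
      rw [join_cons_cons]
      cases w with
      | nil => exact absurd rfl hw
      | cons a as => simp

lemma emit_eq_join_goWords (keep : Char → Bool) (s : List Char) :
    ∀ (words : List (List Char)) (buf : List Char), [] ∉ words →
    emitWords keep s
        (PySem.Chars.join [' '] words
          ++ (if words.isEmpty || buf.isEmpty then [] else [' ']) ++ buf)
        (!buf.isEmpty)
      = PySem.Chars.join [' '] (goWords keep s buf words) := by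
  induction s with
  | nil =>
    intro words buf hne
    simp only [emitWords, goWords]
    by_cases hb : buf.isEmpty
    · simp [List.isEmpty_iff.mp hb]
    · rw [if_neg hb, join_append_singleton]
      have hb1 : buf.isEmpty = false := by simpa using hb
      by_cases hw : words.isEmpty <;> simp [hw, hb1]
  | cons c rest ih =>
    intro words buf hne
    simp only [emitWords, goWords]
    by_cases hk : keep c
    · rw [if_pos hk, if_pos hk]
      by_cases hb : buf.isEmpty
      · have hbnil : buf = [] := List.isEmpty_iff.mp hb
        subst hbnil
        by_cases hw : words.isEmpty
        · have hwnil : words = [] := List.isEmpty_iff.mp hw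
          subst hwnil
          have := ih [] [c] (by simp)
          simpa [join_nil'] using this
        · have hw1 : words.isEmpty = false := by simpa using hw
          have hjoin := join_ne_nil words hne hw
          have hj1 : (PySem.Chars.join [' '] words).isEmpty = false := by simpa using hjoin
          have := ih words [c] hne
          simp only [hw1, Bool.false_or, List.isEmpty_cons, List.isEmpty_nil,
            Bool.or_true, Bool.not_false, Bool.not_true, if_true, List.append_nil] at this ⊢
          simpa [hj1, List.append_assoc] using this
      · have hb1 : buf.isEmpty = false := by simpa using hb
        have hb2 : (buf ++ [c]).isEmpty = false := by simp
        have := ih words (buf ++ [c]) hne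
        simp only [hb1, hb2, Bool.or_false, Bool.not_false, Bool.not_true,
          Bool.false_and, Bool.false_eq_true, if_false] at this ⊢
        simpa [List.append_assoc] using this
    · rw [if_neg hk, if_neg hk]
      by_cases hb : buf.isEmpty
      · have hbnil : buf = [] := List.isEmpty_iff.mp hb
        subst hbnil
        rw [if_pos (show (([]:List Char).isEmpty) = true from rfl)]
        have := ih words [] hne
        simpa using this
      · rw [if_neg hb]
        have hb1 : buf.isEmpty = false := by simpa using hb
        have hbuf : buf ≠ [] := fun he => hb (by simp [he])
        have hne' : [] ∉ words ++ [buf] := by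
          intro hmem
          rcases List.mem_append.mp hmem with h | h
          · exact hne h
          · exact hbuf (List.mem_singleton.mp h).symm
        have := ih (words ++ [buf]) [] hne'
        rw [join_append_singleton] at this
        by_cases hw : words.isEmpty <;> simp [hw, hb1] at this ⊢ <;>
          simpa [List.append_assoc] using this

lemma contains_ofList {α : Type} [DecidableEq α] (d : List α) (x : α) :
    PySem.Set.contains (PySem.Set.ofList d) x = d.contains x := by
  by_cases hx : x ∈ d
  · have : x ∈ PySem.Set.ofList d := (PySem.Set.mem_ofList d x).mpr hx
    simp [PySem.Set.contains, List.contains_eq_mem, this, hx]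
  · have : x ∉ PySem.Set.ofList d := fun hm => hx ((PySem.Set.mem_ofList d x).mp hm)
    simp [PySem.Set.contains, List.contains_eq_mem, this, hx]

set_option maxHeartbeats 1600000 in
lemma keep_eq (ck : Option (List String)) (c : Char) :
    ((ck.getD []).contains (String.mk [c]) || PySem.Str.startswith (pvCategory c) "L"
        || ["Mn", "Nd", "Nl", "No"].contains (pvCategory c))
      = (PySem.Set.contains (PySem.Set.ofList (ck.getD [])) (String.mk [c])
        || PySem.Set.contains (PySem.Set.ofList ["Ll", "Lm", "Lo", "Lt", "Lu", "Mn", "Nd", "Nl", "No"]) (pvCategory c)) := by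
  have ht : PySem.Set.contains (PySem.Set.ofList ["Ll", "Lm", "Lo", "Lt", "Lu", "Mn", "Nd", "Nl", "No"]) (pvCategory c)
      = (PySem.Str.startswith (pvCategory c) "L"
          || ["Mn", "Nd", "Nl", "No"].contains (pvCategory c)) := by
    unfold pvCategory
    by_cases h0 : 'a' ≤ c ∧ c ≤ 'z'
    · rw [if_pos h0]; rfl
    rw [if_neg h0]
    by_cases h1 : 'A' ≤ c ∧ c ≤ 'Z'
    · rw [if_pos h1]; rfl
    rw [if_neg h1]
    by_cases h2 : '0' ≤ c ∧ c ≤ '9'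
    · rw [if_pos h2]; rfl
    rw [if_neg h2]
    by_cases h3 : c = ' '
    · rw [if_pos h3]; rfl
    rw [if_neg h3]
    by_cases h4 : c.toNat = 9 ∨ c.toNat = 10 ∨ c.toNat = 13
    · rw [if_pos h4]; rfl
    rw [if_neg h4]
    by_cases h5 : c = '-'
    · rw [if_pos h5]; rfl
    rw [if_neg h5]
    by_cases h6 : c = '_'
    · rw [if_pos h6]; rfl
    rw [if_neg h6]
    by_cases h7 : c = '(' ∨ c = '[' ∨ c = '{'
    · rw [if_pos h7]; rfl
    rw [if_neg h7]
    by_cases h8 : c = ')' ∨ c = ']' ∨ c = '}'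
    · rw [if_pos h8]; rfl
    rw [if_neg h8]
    by_cases h9 : c = '$'
    · rw [if_pos h9]; rfl
    rw [if_neg h9]
    by_cases h10 : c = '^' ∨ c = '`'
    · rw [if_pos h10]; rfl
    rw [if_neg h10]
    by_cases h11 : c = '+' ∨ c = '<' ∨ c = '=' ∨ c = '>' ∨ c = '|' ∨ c = '~'
    · rw [if_pos h11]; rfl
    rw [if_neg h11]
    rfl
  rw [contains_ofList, ht, Bool.or_assoc]


lemma core_eq (s : String) (ck : Option (List String)) : cleanCoreA s ck = cleanCoreB s ck := by
  have h1 := mask_foldl_eq_map (fun c =>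
    PySem.Set.contains (PySem.Set.ofList (ck.getD [])) (String.mk [c])
      || PySem.Set.contains (PySem.Set.ofList ["Ll", "Lm", "Lo", "Lt", "Lu", "Mn", "Nd", "Nl", "No"]) (pvCategory c)) s.toList []
  have h2 := split_go_eq_goWords (fun c =>
    PySem.Set.contains (PySem.Set.ofList (ck.getD [])) (String.mk [c])
      || PySem.Set.contains (PySem.Set.ofList ["Ll", "Lm", "Lo", "Lt", "Lu", "Mn", "Nd", "Nl", "No"]) (pvCategory c)) s.toList [] []
  have h3 := emit_eq_join_goWords (fun c =>
    (PySem.Set.contains (PySem.Set.ofList (ck.getD [])) (String.mk [c])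
      || PySem.Set.contains (PySem.Set.ofList ["Ll", "Lm", "Lo", "Lt", "Lu", "Mn", "Nd", "Nl", "No"]) (pvCategory c))
      && !(PySem.Chars.isspace c)) s.toList [] [] (by simp)
  simp only [List.nil_append] at h1
  simp only [List.reverse_nil] at h2
  simp only [join_nil', List.isEmpty_nil, Bool.true_or, List.append_nil,
   Bool.not_true, if_true] at h3
  have hfun : (fun c =>
      ((ck.getD []).contains (String.mk [c]) || PySem.Str.startswith (pvCategory c) "L"
        || ["Mn", "Nd", "Nl", "No"].contains (pvCategory c))
        && !(PySem.Chars.isspace c))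
      = (fun c =>
      (PySem.Set.contains (PySem.Set.ofList (ck.getD [])) (String.mk [c])
        || PySem.Set.contains (PySem.Set.ofList ["Ll", "Lm", "Lo", "Lt", "Lu", "Mn", "Nd", "Nl", "No"]) (pvCategory c))
        && !(PySem.Chars.isspace c)) := by
    funext c; rw [keep_eq ck c]
  simp only [cleanCoreA, cleanCoreB, PySem.Chars.split₀, h1, h2, hfun, ← h3]

-- B's marker loop over the two pairs equals A's two sequential marker blocks
lemma strip_eq (text cs ds : String) (ucs uds : Bool) :
    stripMarkersB text [(cs, ucs), (ds, uds)]
      = (pvStripMarker text cs ucs).bind (fun s1 => pvStripMarker s1 ds uds) := by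
  unfold stripMarkersB pvStripMarker
  split_ifs <;> simp_all [stripMarkersB]

-- ===== VERDICT (by name: the statement is the Claim_ definition above) =====
theorem clean_text_unicode_spec : Claim_equal_clean_text_unicode := by
  intro text ck cs ucs ds uds _
  unfold Spec_clean_text_unicode clean_text_unicode clean_text_unicode_alt
  rw [strip_eq]
  cases pvStripMarker text cs ucs with
  | none => rfl
  | some s1 =>
    show (match pvStripMarker s1 ds uds with
          | none => ""
          | some s2 => cleanCoreA s2 ck)
        = (match pvStripMarker s1 ds uds with
          | none => ""
          | some s => cleanCoreB s ck)
    cases pvStripMarker s1 ds uds with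
    | none => rfl
    | some s2 => exact core_eq s2 ck
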